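-- pv_equiv track=rewrite | github.com/robbert-harms/MOT | mot/cl_routines/filters/base.py | _get_ks_sub2ind_func
-- ===== SOURCE A (Python) =====
-- def _get_ks_sub2ind_func(volume_shape):
--     """Get the kernel source part for converting array subscripts to indices"""
--     s = 'long sub2ind('
--     for i in range(len(volume_shape)):
--         s += 'const long dim' + str(i) + ', '
--     s = s[0:-2] + '){' + "\n"
--     s += 'return '
--     for i, d in enumerate(volume_shape):
--         stride = ''
--         for ds in volume_shape[(i + 1):]:
--             stride += ' * ' + str(ds)
--         s += 'dim' + str(i) + stride + ' + '
--     s = s[0:-3] + ';' + "\n"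
--     s += '}' + "\n"
--     return s
-- ===== SOURCE B (Python) =====
-- def _get_ks_sub2ind_func(volume_shape):
--     """Get the kernel source part for converting array subscripts to indices"""
--     suffixes = []
--     acc = ''
--     for d in reversed(volume_shape):
--         suffixes.append(acc)
--         acc = ' * ' + str(d) + acc
--     suffixes.reverse()
--     params = ', '.join('const long dim' + str(i) for i in range(len(volume_shape)))
--     terms = ' + '.join('dim' + str(i) + sfx for i, sfx in enumerate(suffixes))
--     return 'long sub2ind(' + params + '){\nreturn ' + terms + ';\n}\n'
-- ===== Notes on version B (the rewrite author's own statement) =====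
-- stated objective: alternative
-- what changed: B precomputes all stride suffixes in one reverse pass and assembles the source with ', '/' + ' joins, instead of A's per-index rescan of the remaining dimensions and trailing-separator slicing.
-- intended difference: On the empty shape A's s[0:-2]/s[0:-3] strips cut into the literal header and keyword, returning 'long sub2in){\nretu;\n}\n'; B returns the well-formed 'long sub2ind(){\nreturn ;\n}\n', which is the intended source text. — e.g. on _get_ks_sub2ind_func([]): A returns "long sub2in){\nretu;\n}\n", B returns "long sub2ind(){\nreturn ;\n}\n"
import Mathlib
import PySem

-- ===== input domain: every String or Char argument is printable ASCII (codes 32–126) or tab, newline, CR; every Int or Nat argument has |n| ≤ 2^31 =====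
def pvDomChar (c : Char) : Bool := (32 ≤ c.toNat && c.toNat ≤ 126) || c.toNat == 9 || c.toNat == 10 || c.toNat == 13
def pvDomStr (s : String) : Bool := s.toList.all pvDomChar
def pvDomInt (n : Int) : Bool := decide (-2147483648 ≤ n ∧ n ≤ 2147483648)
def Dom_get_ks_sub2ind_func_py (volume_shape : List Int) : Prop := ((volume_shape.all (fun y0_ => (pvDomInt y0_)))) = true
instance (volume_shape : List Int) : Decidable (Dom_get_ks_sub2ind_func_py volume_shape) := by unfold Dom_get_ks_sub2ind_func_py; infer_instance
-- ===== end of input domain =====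

-- B replaces A's per-index rescan of the trailing dimensions by a single reverse pass that
-- precomputes all stride suffixes, and assembles the source with joins instead of A's
-- trailing-separator slicing; on the empty shape A's slicing truncates into the literal header
-- ('long sub2in){\nretu;\n}\n') and B emits the well-formed 'long sub2ind(){\nreturn ;\n}\n'
-- instead (stated as D_).


-- ===== PORT A =====
def get_ks_sub2ind_func_py (volume_shape : List Int) : String :=
  let s := "long sub2ind("
  let s := (PySem.List.pyRange 0 (PySem.List.len volume_shape) 1).foldl
      (fun s i => s ++ "const long dim" ++ PySem.Int.toStr i ++ ", ") s
  let s := PySem.Str.slice s (some 0) (some (-2)) ++ "){" ++ "\n"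
  let s := s ++ "return "
  let s := (PySem.List.enumerate volume_shape).foldl
      (fun s p =>
        let stride := (PySem.List.slice volume_shape (some (p.1 + 1)) none).foldl
            (fun st ds => st ++ " * " ++ PySem.Int.toStr ds) ""
        s ++ "dim" ++ PySem.Int.toStr p.1 ++ stride ++ " + ") s
  let s := PySem.Str.slice s (some 0) (some (-3)) ++ ";" ++ "\n"
  s ++ "}" ++ "\n"

-- ===== PORT B =====
def get_ks_sub2ind_func_py_alt (volume_shape : List Int) : String :=
  let st := volume_shape.reverse.foldl
      (fun (st : List String × String) d =>
        (st.1 ++ [st.2], " * " ++ PySem.Int.toStr d ++ st.2)) ([], "")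
  let suffixes := st.1.reverse
  let params := PySem.Str.join ", "
      ((PySem.List.pyRange 0 (PySem.List.len volume_shape) 1).map
        (fun i => "const long dim" ++ PySem.Int.toStr i))
  let terms := PySem.Str.join " + "
      ((PySem.List.enumerate suffixes).map (fun p => "dim" ++ PySem.Int.toStr p.1 ++ p.2))
  "long sub2ind(" ++ params ++ "){" ++ "\n" ++ "return " ++ terms ++ ";" ++ "\n" ++ "}" ++ "\n"

-- ===== PRECONDITION & SPEC =====
-- On the empty shape A returns a string whose 'sub2ind(' header and 'return ' keyword are
-- truncated by the trailing-separator strips ('long sub2in){\nretu;\n}\n'); B returns the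
-- well-formed 'long sub2ind(){\nreturn ;\n}\n', which is the intended source text.
def D_get_ks_sub2ind_func_py (volume_shape : List Int) : Prop := volume_shape = []
instance (volume_shape : List Int) : Decidable (D_get_ks_sub2ind_func_py volume_shape) := by
  unfold D_get_ks_sub2ind_func_py; infer_instance
def Spec_get_ks_sub2ind_func_py (volume_shape : List Int) (out : String) : Prop :=
  ¬ D_get_ks_sub2ind_func_py volume_shape → out = get_ks_sub2ind_func_py_alt volume_shape
instance (volume_shape : List Int) (out : String) : Decidable (Spec_get_ks_sub2ind_func_py volume_shape out) := by
  unfold Spec_get_ks_sub2ind_func_py; infer_instance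
def pvDiffWitness_get_ks_sub2ind_func_py : List Int := []
def pvDiffWitnessOut_get_ks_sub2ind_func_py : String × String :=
  ("long sub2in){\nretu;\n}\n", "long sub2ind(){\nreturn ;\n}\n")

-- ===== CLAIM (what is proved, stated in full; the proofs are below) =====
def Claim_unchanged_get_ks_sub2ind_func_py : Prop := ∀ (volume_shape : List Int), Dom_get_ks_sub2ind_func_py volume_shape → Spec_get_ks_sub2ind_func_py volume_shape (get_ks_sub2ind_func_py volume_shape)
def Claim_changed_get_ks_sub2ind_func_py : Prop := Dom_get_ks_sub2ind_func_py (pvDiffWitness_get_ks_sub2ind_func_py) ∧ D_get_ks_sub2ind_func_py (pvDiffWitness_get_ks_sub2ind_func_py) ∧ get_ks_sub2ind_func_py (pvDiffWitness_get_ks_sub2ind_func_py) = pvDiffWitnessOut_get_ks_sub2ind_func_py.1 ∧ get_ks_sub2ind_func_py_alt (pvDiffWitness_get_ks_sub2ind_func_py) = pvDiffWitnessOut_get_ks_sub2ind_func_py.2 ∧ pvDiffWitnessOut_get_ks_sub2ind_func_py.1 ≠ pvDiffWitnessOut_get_ks_sub2ind_func_py.2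
def Claim_exact_get_ks_sub2ind_func_py : Prop := ∀ (volume_shape : List Int), Dom_get_ks_sub2ind_func_py volume_shape → D_get_ks_sub2ind_func_py volume_shape → get_ks_sub2ind_func_py volume_shape ≠ get_ks_sub2ind_func_py_alt volume_shape

-- ===== LEMMAS AND PROOFS =====

-- chars of the stride string hanging off index i (product of the dimensions after i)
def charStride (l : List Int) : List Char :=
  l.flatMap (fun d => (" * ").toList ++ PySem.Int.toChars d)

-- flatten-with-trailing-separator vs join, nonempty chunk list
theorem flatMap_sep_eq_join (sep : List Char) (chunks : List (List Char)) (h : chunks ≠ []) :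
    chunks.flatMap (fun c => c ++ sep) = PySem.Chars.join sep chunks ++ sep := by
  induction chunks with
  | nil => simp at h
  | cons c rest ih =>
    cases rest with
    | nil => simp [PySem.Chars.join_singleton]
    | cons q r =>
      rw [PySem.Chars.join_cons_cons]
      simp only [List.flatMap_cons] at ih ⊢
      rw [ih (by simp)]
      simp


-- strip a trailing separator of length k with Python's s[:-k]
theorem take_strip (X sep : List Char) (k : Nat) (h : sep.length = k) :
    (X ++ sep).take ((X ++ sep).length - k) = X := by
  rw [List.length_append]
  have : X.length + sep.length - k = X.length := by omega
  rw [this, List.take_left]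

-- A's parameter loop at the char level
theorem foldl_params_toList (l : List Int) (s0 : String) :
    (l.foldl (fun s i => s ++ "const long dim" ++ PySem.Int.toStr i ++ ", ") s0).toList
      = s0.toList ++ l.flatMap
          (fun i => "const long dim".toList ++ PySem.Int.toChars i ++ ", ".toList) := by
  induction l generalizing s0 with
  | nil => simp
  | cons x t ih =>
    simp [ih, String.toList_append, PySem.Int.toList_toStr]

-- A's inner stride loop at the char level
theorem foldl_stride_toList (l : List Int) (s0 : String) :
    (l.foldl (fun st ds => st ++ " * " ++ PySem.Int.toStr ds) s0).toList
      = s0.toList ++ charStride l := by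
  induction l generalizing s0 with
  | nil => simp [charStride]
  | cons x t ih =>
    simp [ih, charStride, String.toList_append, PySem.Int.toList_toStr]

-- A's term loop at the char level (f is the stride string of the current pair)
theorem foldl_terms_toList (f : Int × Int → String) (l : List (Int × Int)) (s0 : String) :
    (l.foldl (fun s p => s ++ "dim" ++ PySem.Int.toStr p.1 ++ f p ++ " + ") s0).toList
      = s0.toList ++ l.flatMap
          (fun p => "dim".toList ++ PySem.Int.toChars p.1 ++ (f p).toList ++ " + ".toList) := by
  induction l generalizing s0 with
  | nil => simp
  | cons x t ih =>
    simp [ih, String.toList_append, PySem.Int.toList_toStr]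

-- B's reverse pass, made structural for the proof
def prepAux : List Int → String → String
  | [], acc => acc
  | d :: t, acc => prepAux t (" * " ++ PySem.Int.toStr d ++ acc)

def sufAux : List Int → String → List String
  | [], _ => []
  | d :: t, acc => acc :: sufAux t (" * " ++ PySem.Int.toStr d ++ acc)

theorem foldl_step_eq (rs : List Int) (sfx : List String) (acc : String) :
    rs.foldl (fun (st : List String × String) d =>
        (st.1 ++ [st.2], " * " ++ PySem.Int.toStr d ++ st.2)) (sfx, acc)
      = (sfx ++ sufAux rs acc, prepAux rs acc) := by
  induction rs generalizing sfx acc with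
  | nil => simp [sufAux, prepAux]
  | cons d t ih => simp [sufAux, prepAux, ih]

theorem prepAux_toList (rs : List Int) (acc : String) :
    (prepAux rs acc).toList = charStride rs.reverse ++ acc.toList := by
  induction rs generalizing acc with
  | nil => simp [prepAux, charStride]
  | cons d t ih =>
    simp [prepAux, ih, charStride, String.toList_append, PySem.Int.toList_toStr]

theorem sufAux_append (l1 l2 : List Int) (acc : String) :
    sufAux (l1 ++ l2) acc = sufAux l1 acc ++ sufAux l2 (prepAux l1 acc) := by
  induction l1 generalizing acc with
  | nil => simp [sufAux, prepAux]
  | cons d t ih => simp [sufAux, prepAux, ih]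

theorem sufAux_reverse_map (vs : List Int) (acc : String) :
    ((sufAux vs.reverse acc).reverse).map String.toList
      = (List.range vs.length).map (fun i => charStride (vs.drop (i + 1)) ++ acc.toList) := by
  induction vs with
  | nil => simp [sufAux]
  | cons y ys ih =>
    rw [List.reverse_cons, sufAux_append, List.reverse_append]
    simp only [sufAux, List.reverse_cons, List.reverse_nil, List.nil_append,
      List.singleton_append, List.map_cons, prepAux_toList, List.reverse_reverse]
    rw [List.length_cons, List.range_succ_eq_map]
    simp [ih]

-- the canonical char chunk of term i
def termChunkC (vs : List Int) (p : Int × Int) : List Char :=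
  "dim".toList ++ PySem.Int.toChars p.1 ++ charStride (vs.drop (p.1.toNat + 1))


-- flatten chunks with a trailing separator = join plus one separator (nonempty chunk list)
theorem flatMap_chunk_sep_eq_join {α : Type} (c : α → List Char) (sep : List Char)
    (l : List α) (h : l ≠ []) :
    l.flatMap (fun x => c x ++ sep) = PySem.Chars.join sep (l.map c) ++ sep := by
  rw [← List.flatMap_map c (fun d => d ++ sep)]
  exact flatMap_sep_eq_join sep (l.map c) (by simpa using h)

theorem main_ne (vs : List Int) (hne : vs ≠ []) :
    get_ks_sub2ind_func_py vs = get_ks_sub2ind_func_py_alt vs := by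
  have hn : 0 < vs.length := List.length_pos_of_ne_nil hne
  have hRne : PySem.List.pyRange 0 (PySem.List.len vs) 1 ≠ [] := by
    rw [PySem.List.len_eq, PySem.List.pyRange_zero_natCast]
    intro h
    have := congrArg List.length h
    simp at this
    exact hne this
  have hEne : PySem.List.enumerate vs (0 : Int) ≠ [] := by
    intro h
    have := congrArg List.length h
    simp [PySem.List.length_enumerate] at this
    exact hne this
  refine String.toList_inj.mp ?_
  have hA : (get_ks_sub2ind_func_py vs).toList
      = "long sub2ind(".toList
        ++ PySem.Chars.join ", ".toList
            ((PySem.List.pyRange 0 (PySem.List.len vs) 1).map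
              (fun i => "const long dim".toList ++ PySem.Int.toChars i))
        ++ "){".toList ++ "\n".toList ++ "return ".toList
        ++ PySem.Chars.join " + ".toList ((PySem.List.enumerate vs).map (termChunkC vs))
        ++ ";".toList ++ "\n".toList ++ "}".toList ++ "\n".toList := by
    simp only [get_ks_sub2ind_func_py]
    simp only [String.toList_append, PySem.Str.toList_slice, PySem.Chars.slice_eq_listSlice,
      PySem.List.slice_zero_start]
    rw [PySem.List.slice_to_neg_ofNat _ 3 (by norm_num)]
    rw [foldl_terms_toList]
    simp only [String.toList_append, PySem.Str.toList_slice, PySem.Chars.slice_eq_listSlice,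
      PySem.List.slice_zero_start]
    rw [PySem.List.slice_to_neg_ofNat _ 2 (by norm_num)]
    rw [foldl_params_toList,
        flatMap_chunk_sep_eq_join (fun i => "const long dim".toList ++ PySem.Int.toChars i)
          ", ".toList _ hRne]
    rw [List.flatMap_congr (l := PySem.List.enumerate vs)
      (g := fun p => termChunkC vs p ++ " + ".toList) ?side]
    case side =>
      intro p hp
      obtain ⟨k, hk, rfl⟩ := (PySem.List.mem_enumerate_iff vs 0 p).mp hp
      have h1 : (0 : Int) + (k : Int) + 1 = ((k + 1 : Nat) : Int) := by push_cast; ring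
      rw [h1, PySem.List.slice_from vs (by positivity), foldl_stride_toList]
      simp [termChunkC]
    rw [flatMap_chunk_sep_eq_join (termChunkC vs) " + ".toList _ hEne]
    simp only [← List.append_assoc]
    rw [take_strip _ _ 2 (by decide), take_strip _ _ 3 (by decide)]
  have hsuf : ((sufAux vs.reverse "").reverse).map String.toList
      = (List.range vs.length).map (fun i => charStride (vs.drop (i + 1))) := by
    simpa using sufAux_reverse_map vs ""
  have hsuflen : (sufAux vs.reverse "").reverse.length = vs.length := by
    have := congrArg List.length hsuf
    simpa using this
  have hparts : (PySem.List.enumerate ((sufAux vs.reverse "").reverse)).map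
        (fun p => "dim".toList ++ (PySem.Int.toChars p.1 ++ p.2.toList))
      = (PySem.List.enumerate vs).map (termChunkC vs) := by
    apply List.ext_getElem
    · simp [PySem.List.length_enumerate, hsuflen]
    · intro k h1 h2
      have hkv : k < vs.length := by
        simpa [PySem.List.length_enumerate] using h2
      have hks : k < (sufAux vs.reverse "").reverse.length := by omega
      simp only [List.getElem_map]
      rw [PySem.List.getElem_enumerate _ _ k (by simpa [PySem.List.length_enumerate] using hks),
          PySem.List.getElem_enumerate _ _ k (by simpa [PySem.List.length_enumerate] using hkv)]
      have h3 : (sufAux vs.reverse "").reverse[k].toList = charStride (vs.drop (k + 1)) := by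
        have h4 : ((sufAux vs.reverse "").reverse.map String.toList)[k]'(by simpa using hks)
            = ((List.range vs.length).map (fun i => charStride (vs.drop (i + 1))))[k]'(by simpa using hkv) := by
          simp only [hsuf]
        simpa only [List.getElem_map, List.getElem_range] using h4
      simp only [h3]
      simp [termChunkC]
  have hB : (get_ks_sub2ind_func_py_alt vs).toList
      = "long sub2ind(".toList
        ++ PySem.Chars.join ", ".toList
            ((PySem.List.pyRange 0 (PySem.List.len vs) 1).map
              (fun i => "const long dim".toList ++ PySem.Int.toChars i))
        ++ "){".toList ++ "\n".toList ++ "return ".toList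
        ++ PySem.Chars.join " + ".toList ((PySem.List.enumerate vs).map (termChunkC vs))
        ++ ";".toList ++ "\n".toList ++ "}".toList ++ "\n".toList := by
    simp only [get_ks_sub2ind_func_py_alt]
    rw [foldl_step_eq]
    simp only [List.nil_append, String.toList_append, PySem.Str.toList_join, List.map_map]
    rw [← hparts]
    simp [Function.comp_def, String.toList_append, PySem.Int.toList_toStr, List.append_assoc]
  exact hA.trans hB.symm

-- ===== VERDICT (by name: the statement is the Claim_ definition above) =====
theorem get_ks_sub2ind_func_py_spec : Claim_unchanged_get_ks_sub2ind_func_py := by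
  intro vs _ hnd
  exact main_ne vs hnd

theorem get_ks_sub2ind_func_py_changed : Claim_changed_get_ks_sub2ind_func_py := by
  unfold Claim_changed_get_ks_sub2ind_func_py; decide

theorem get_ks_sub2ind_func_py_tight : Claim_exact_get_ks_sub2ind_func_py := by
  unfold Claim_exact_get_ks_sub2ind_func_py
  intro vs _ hD
  subst hD
  decide
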